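-- pv_equiv track=rewrite | github.com/ryyyyan-taylor/csci2824 | HW11/mega_digit.py | mega_digit
-- ===== SOURCE A (Python) =====
-- def mega_digit (n, k) :
--     x = ""
--
--     for i in range (0, k) :
--         x += str(n)
--
--     out = 0
--
--     while (True) :
--         for digit in x :
--             out += int(digit)
--
--         if (len(str(out)) == 1) :
--             break
--         x = str(out)
--         out = 0
--
--     return out
-- ===== SOURCE B (Python) =====
-- def mega_digit(n, k):
--     # digital root via the closed form: digit sum of |n| times k, then 1 + (m-1) % 9
--     s = sum(int(c) for c in str(abs(n)))
--     m = s * max(k, 0)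
--     return 0 if m == 0 else 1 + (m - 1) % 9
-- ===== Notes on version B (the rewrite author's own statement) =====
-- stated objective: faster
-- what changed: Replaces building str(n) repeated k times and iterating digit sums to a fixed point by the closed-form digital root: digit sum of n once, times k, then 1+(m-1)%9.
import Mathlib
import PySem

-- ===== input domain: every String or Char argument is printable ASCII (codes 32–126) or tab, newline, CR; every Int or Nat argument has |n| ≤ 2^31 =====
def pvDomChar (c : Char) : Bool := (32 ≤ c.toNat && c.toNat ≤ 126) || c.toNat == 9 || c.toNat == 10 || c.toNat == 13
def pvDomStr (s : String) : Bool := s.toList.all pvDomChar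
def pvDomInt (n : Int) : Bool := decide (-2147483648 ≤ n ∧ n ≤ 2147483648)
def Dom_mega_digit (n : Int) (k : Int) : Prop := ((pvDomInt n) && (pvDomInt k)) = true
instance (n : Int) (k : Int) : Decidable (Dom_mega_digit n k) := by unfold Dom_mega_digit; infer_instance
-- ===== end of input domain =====

-- B replaces A's repeated-string digit-sum iteration by the closed-form digital root (faster).

-- ===== PORT A =====
-- int(digit) for a one-character string; total form with default 0 (Pre_ ensures all characters are digits)
def pvDigitVal (c : Char) : Int := (PySem.Int.ofChars? [c]).getD 0

-- the inner 'for digit in x : out += int(digit)' pass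
def pvSumA (x : List Char) : Int := x.foldl (fun out digit => out + pvDigitVal digit) 0

-- the 'while True' loop; the Nat argument only makes the recursion structural and is chosen
-- large enough at the call site (the loop provably finishes within that many rounds)
def pvLoopA : Nat → List Char → Int
  | 0, _ => 0
  | fuel + 1, x =>
    let out := pvSumA x
    if (PySem.Int.toChars out).length = 1 then out
    else pvLoopA fuel (PySem.Int.toChars out)

def mega_digit (n : Int) (k : Int) : Int :=
  let x := (PySem.List.pyRange 0 k 1).foldl (fun x _ => x ++ PySem.Int.toChars n) ([] : List Char)
  pvLoopA (9 * x.length + 2) x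

-- ===== PORT B =====
def mega_digit_alt (n : Int) (k : Int) : Int :=
  let s := ((PySem.Int.toChars |n|).map pvDigitVal).sum
  let m := s * max k 0
  if m = 0 then 0 else 1 + PySem.Int.mod (m - 1) 9

-- ===== PRECONDITION & SPEC =====
-- A raises ValueError when n < 0 and k > 0 (int('-') on the sign character of str(n)); those inputs are excluded.
def Pre_mega_digit (n : Int) (k : Int) : Prop := 0 ≤ n ∨ k ≤ 0
instance (n : Int) (k : Int) : Decidable (Pre_mega_digit n k) := by unfold Pre_mega_digit; infer_instance
def pvWitness_mega_digit : Int × Int := (12, 3)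

def Spec_mega_digit (n : Int) (k : Int) (out : Int) : Prop := out = mega_digit_alt n k
instance (n : Int) (k : Int) (out : Int) : Decidable (Spec_mega_digit n k out) := by unfold Spec_mega_digit; infer_instance

-- ===== CLAIM (what is proved, stated in full; the proofs are below) =====
def Claim_equal_mega_digit : Prop := ∀ (n : Int) (k : Int), Dom_mega_digit n k → Pre_mega_digit n k → Spec_mega_digit n k (mega_digit n k)

-- ===== LEMMAS AND PROOFS =====

-- Nat.toDigits (what PySem.Int.toChars uses for n ≥ 0) written via Nat.digits
theorem pv_toDigitsCore_eq (fuel : Nat) : ∀ (n : Nat) (ds : List Char), 0 < n → n < fuel →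
    Nat.toDigitsCore 10 fuel n ds = ((Nat.digits 10 n).map Nat.digitChar).reverse ++ ds := by
  induction fuel with
  | zero => intro n ds h hf; omega
  | succ f ih =>
    intro n ds h hf
    rw [Nat.toDigitsCore]
    rw [Nat.digits_def' (by norm_num : 1 < 10) h]
    by_cases hz : n / 10 = 0
    · simp [hz]
    · simp only [hz, if_false]
      rw [ih (n / 10) _ (Nat.pos_of_ne_zero hz) (by omega)]
      simp

theorem pv_toDigits_eq {m : Nat} (h : 0 < m) :
    Nat.toDigits 10 m = ((Nat.digits 10 m).map Nat.digitChar).reverse := by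
  rw [Nat.toDigits, pv_toDigitsCore_eq (m+1) m [] h (by omega)]; simp

theorem pv_digitVal_digitChar {d : Nat} (h : d < 10) : pvDigitVal (Nat.digitChar d) = (d : Int) := by
  interval_cases d <;> decide

theorem pv_mapsum_toChars (m : Nat) :
    ((PySem.Int.toChars (m : Int)).map pvDigitVal).sum = ((Nat.digits 10 m).sum : Int) := by
  rcases Nat.eq_zero_or_pos m with h | h
  · subst h; decide
  · have h0 : ¬ ((m : Int) < 0) := by omega
    simp only [PySem.Int.toChars, h0, if_false, Int.toNat_natCast]
    rw [pv_toDigits_eq h, List.map_reverse, List.sum_reverse, List.map_map]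
    rw [List.map_congr_left (fun d hd =>
      (by exact pv_digitVal_digitChar (Nat.digits_lt_base (by norm_num) hd) :
        (pvDigitVal ∘ Nat.digitChar) d = (d : Int)))]
    rw [Nat.cast_list_sum]

theorem pv_sumA_eq (x : List Char) : pvSumA x = (x.map pvDigitVal).sum := by
  simpa using PySem.List.foldl_add x pvDigitVal 0

theorem pv_sumA_toChars (m : Nat) :
    pvSumA (PySem.Int.toChars (m : Int)) = ((Nat.digits 10 m).sum : Int) := by
  rw [pv_sumA_eq, pv_mapsum_toChars]

theorem pv_digit_sum_le (m : Nat) : (Nat.digits 10 m).sum ≤ m := by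
  induction m using Nat.strong_induction_on with
  | _ m ih =>
    rcases Nat.eq_zero_or_pos m with h | h
    · simp [h]
    · rw [Nat.digits_def' (by norm_num : 1 < 10) h]
      have := ih (m / 10) (by omega)
      simp only [List.sum_cons]
      omega

theorem pv_digit_sum_lt {m : Nat} (h : 10 ≤ m) : (Nat.digits 10 m).sum < m := by
  rw [Nat.digits_def' (by norm_num : 1 < 10) (by omega)]
  have := pv_digit_sum_le (m / 10)
  simp only [List.sum_cons]
  omega

theorem pv_digit_sum_pos {m : Nat} (h : 0 < m) : 0 < (Nat.digits 10 m).sum := by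
  induction m using Nat.strong_induction_on with
  | _ m ih =>
    rw [Nat.digits_def' (by norm_num : 1 < 10) h]
    simp only [List.sum_cons]
    by_cases hr : m % 10 = 0
    · have := ih (m / 10) (by omega) (by omega)
      omega
    · omega

theorem pv_digit_sum_mod9 (m : Nat) : (Nat.digits 10 m).sum % 9 = m % 9 :=
  (Nat.modEq_digits_sum 9 10 (by norm_num) m).symm

theorem pv_len_toChars_one {j : Nat} : (PySem.Int.toChars (j : Int)).length = 1 ↔ j ≤ 9 := by
  rcases Nat.eq_zero_or_pos j with h | h
  · subst h; decide
  · have h0 : ¬ ((j : Int) < 0) := by omega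
    simp only [PySem.Int.toChars, h0, if_false, Int.toNat_natCast]
    rw [pv_toDigits_eq h, List.length_reverse, List.length_map,
      Nat.length_digits 10 j (by norm_num) (by omega)]
    have hlog := Nat.log_eq_zero_iff (b := 10) (n := j)
    have hlt := Nat.lt_pow_succ_log_self (by norm_num : 1 < 10) j
    constructor
    · intro hl
      have h0 : Nat.log 10 j = 0 := by omega
      rw [h0] at hlt; simp at hlt; omega
    · intro hl
      have : Nat.log 10 j = 0 := hlog.mpr (by omega)
      omega

theorem pv_digit_sum_le_len (m : Nat) :
    (Nat.digits 10 m).sum ≤ 9 * (PySem.Int.toChars (m : Int)).length := by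
  rcases Nat.eq_zero_or_pos m with h | h
  · subst h; simp
  · have h0 : ¬ ((m : Int) < 0) := by omega
    simp only [PySem.Int.toChars, h0, if_false, Int.toNat_natCast]
    rw [pv_toDigits_eq h, List.length_reverse, List.length_map]
    have := List.sum_le_card_nsmul (Nat.digits 10 m) 9
      (fun x hx => by have := Nat.digits_lt_base (by norm_num) hx; omega)
    simpa [Nat.smul_one_eq_cast, mul_comm] using this

theorem pv_loopA_succ (f : Nat) (x : List Char) : pvLoopA (f + 1) x =
    (if (PySem.Int.toChars (pvSumA x)).length = 1 then pvSumA x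
     else pvLoopA f (PySem.Int.toChars (pvSumA x))) := rfl

-- A's while-loop computes the digital root of m, given enough rounds
theorem pv_loopA_toChars (fuel : Nat) : ∀ (m : Nat), m < fuel →
    pvLoopA fuel (PySem.Int.toChars (m : Int)) = (if m = 0 then 0 else 1 + ((m : Int) - 1) % 9) := by
  induction fuel with
  | zero => intro m hm; omega
  | succ f ih =>
    intro m hm
    rw [pv_loopA_succ, pv_sumA_toChars m]
    have h9 := pv_digit_sum_mod9 m
    have hle := pv_digit_sum_le m
    split_ifs with hlen hm0 hm0
    · subst hm0; simp
    · have hS9 : (Nat.digits 10 m).sum ≤ 9 := pv_len_toChars_one.mp hlen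
      have hpos := pv_digit_sum_pos (Nat.pos_of_ne_zero hm0)
      omega
    · exfalso
      have : ¬ (Nat.digits 10 m).sum ≤ 9 := fun h => hlen (pv_len_toChars_one.mpr h)
      subst hm0; simp at this
    · have hS10 : 10 ≤ (Nat.digits 10 m).sum := by
        by_contra h; exact hlen (pv_len_toChars_one.mpr (by omega))
      have hm10 : 10 ≤ m := le_trans hS10 hle
      have hlt := pv_digit_sum_lt hm10
      rw [ih _ (by omega)]
      have : (Nat.digits 10 m).sum ≠ 0 := by omega
      rw [if_neg this]
      omega

theorem pv_foldl_append_const {α : Type} (l : List α) (c : List Char) : ∀ (acc : List Char),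
    l.foldl (fun x _ => x ++ c) acc = acc ++ (List.replicate l.length c).flatten := by
  induction l with
  | nil => intro acc; simp
  | cons a l ih =>
    intro acc
    simp only [List.foldl_cons, List.length_cons, ih, List.replicate_succ, List.flatten_cons,
      List.append_assoc]

theorem pv_main : ∀ (n : Int) (k : Int), Pre_mega_digit n k → mega_digit n k = mega_digit_alt n k := by
  intro n k pre
  unfold Pre_mega_digit at pre
  unfold mega_digit mega_digit_alt
  rw [pv_foldl_append_const, List.nil_append, PySem.List.length_pyRange_one]
  dsimp only
  rcases le_or_gt k 0 with hk | hk
  · have h0 : (k - 0).toNat = 0 := by omega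
    rw [h0]
    have hmax : max k 0 = 0 := by omega
    rw [hmax]
    simp [pvLoopA, pvSumA, PySem.Int.toChars]
  · have hn : 0 ≤ n := by rcases pre with h | h; exact h; omega
    set N := n.toNat with hN
    have hnN : (N : Int) = n := Int.toNat_of_nonneg hn
    have habs : |n| = (N : Int) := by rw [abs_of_nonneg hn, hnN]
    set kt := (k - 0).toNat with hkt
    have hktk : (kt : Int) = k := by omega
    set c := PySem.Int.toChars n with hc
    set S := (Nat.digits 10 N).sum with hS
    have hsum_c : (c.map pvDigitVal).sum = (S : Int) := by
      rw [hc, ← hnN, pv_mapsum_toChars]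
    set x := (List.replicate kt c).flatten with hx
    have hsx : pvSumA x = ((kt * S : Nat) : Int) := by
      rw [pv_sumA_eq, hx, List.map_flatten, List.map_replicate, List.sum_flatten,
        List.map_replicate, hsum_c, List.sum_replicate]
      push_cast
      simp
    have hM : ((kt * S : Nat) : Int) = ((c.map pvDigitVal).sum) * max k 0 := by
      rw [hsum_c, max_eq_left (by omega : (0:Int) ≤ k), ← hktk]
      push_cast; ring
    set M := kt * S with hMdef
    have hMb : M ≤ 9 * x.length := by
      have h1 : S ≤ 9 * c.length := by
        rw [hc, ← hnN]; exact pv_digit_sum_le_len N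
      have h2 : x.length = kt * c.length := by
        rw [hx, List.length_flatten, List.map_replicate, List.sum_replicate, smul_eq_mul]
      rw [h2, hMdef]
      calc kt * S ≤ kt * (9 * c.length) := Nat.mul_le_mul_left _ h1
        _ = 9 * (kt * c.length) := by ring
    have h2step : 9 * x.length + 2 = (9 * x.length + 1) + 1 := by omega
    rw [h2step, pv_loopA_succ, hsx]
    rw [habs, hnN, ← hc, ← hM]
    have hmod : ∀ a : Int, 0 ≤ a → PySem.Int.mod a 9 = a % 9 :=
      fun a _ => PySem.Int.mod_eq_emod_of_pos (by norm_num)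
    split_ifs with hlen hz hz
    · have : M ≤ 9 := pv_len_toChars_one.mp hlen
      omega
    · have hM9 : M ≤ 9 := pv_len_toChars_one.mp hlen
      rw [hmod _ (by omega)]
      omega
    · exfalso
      have : M = 0 := by exact_mod_cast hz
      exact hlen (pv_len_toChars_one.mpr (by omega))
    · have hM10 : ¬ M ≤ 9 := fun h => hlen (pv_len_toChars_one.mpr h)
      rw [pv_loopA_toChars _ M (by omega), if_neg (by omega), hmod _ (by omega)]

-- ===== VERDICT (by name: the statement is the Claim_ definition above) =====
theorem mega_digit_spec : Claim_equal_mega_digit := by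
  intro n k _ pre
  unfold Spec_mega_digit
  exact pv_main n k pre
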